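-- pv_equiv track=rewrite | github.com/GhostGamingMc/Vigenere-cracking-python | vigenere_cracking_englisch.py | find_divisors_and_frequencies
-- ===== SOURCE A (Python) =====
-- from math import gcd
-- from collections import Counter
--
-- def find_divisors_without_1_2(number):
--     divisors = []
--     for i in range(3, number + 1):
--         if number % i == 0:
--             divisors.append(i)
--     return divisors
--
-- def find_divisors_and_frequencies(numbers):
--     common_divisor = gcd(*numbers)
--
--     divisors_and_frequencies = Counter()
--
--     # Iterate through the numbers for divisors
--     for number in numbers:
--         divisors = find_divisors_without_1_2(number)
--         divisors_and_frequencies.update(divisors)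
--
--     # Ignore divisors 1 and 2
--     del divisors_and_frequencies[1]
--     del divisors_and_frequencies[2]
--
--     # Split divisors and frequencies into two lists
--     divisors_list, frequencies_list = zip(*[(t, h) for t, h in divisors_and_frequencies.items() if h != 1])
--
--     # Sort the lists by frequency
--     sorted_lists = sorted(zip(frequencies_list, divisors_list), reverse=False)
--     frequencies_list, divisors_list = zip(*sorted_lists)
--
--     return divisors_list, frequencies_list
-- ===== SOURCE B (Python) =====
-- from math import isqrt
--
-- def _divisors_ge3(n):
--     # all divisors d >= 3 of n (n >= 3), found via square-root factor pairs
--     divs = []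
--     for i in range(1, isqrt(n) + 1):
--         if n % i == 0:
--             if i >= 3:
--                 divs.append(i)
--             j = n // i
--             if j != i and j >= 3:
--                 divs.append(j)
--     return divs
--
-- def find_divisors_and_frequencies(numbers):
--     counts = {}
--     for n in numbers:
--         if n >= 3:
--             for d in _divisors_ge3(n):
--                 counts[d] = counts.get(d, 0) + 1
--     items = sorted((c, d) for d, c in counts.items() if c != 1)
--     frequencies, divisors = zip(*items)
--     return divisors, frequencies
-- ===== Notes on version B (the rewrite author's own statement) =====
-- stated objective: faster
-- what changed: B finds each number's divisors via O(sqrt(n)) square-root factor pairs and counts them in a plain dict, instead of trial-testing every candidate from 3 to n and updating a Counter; the (frequency, divisor) sort is unchanged.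
import Mathlib
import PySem

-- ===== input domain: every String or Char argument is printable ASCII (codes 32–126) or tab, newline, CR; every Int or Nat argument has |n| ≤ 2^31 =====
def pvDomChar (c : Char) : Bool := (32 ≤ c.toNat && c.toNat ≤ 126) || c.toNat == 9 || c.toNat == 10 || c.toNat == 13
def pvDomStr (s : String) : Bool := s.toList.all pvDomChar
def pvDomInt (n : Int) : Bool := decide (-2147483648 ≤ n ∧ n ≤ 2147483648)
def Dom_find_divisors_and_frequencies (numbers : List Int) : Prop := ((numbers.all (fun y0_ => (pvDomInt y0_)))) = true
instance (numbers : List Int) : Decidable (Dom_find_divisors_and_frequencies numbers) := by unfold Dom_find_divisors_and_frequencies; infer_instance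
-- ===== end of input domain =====

-- B replaces A's 3..n divisor scan by square-root factor-pair enumeration with a plain dict
-- of counts (objective: faster, asymptotically O(√n) vs O(n) per number).


-- ===== PORT A =====
-- find_divisors_without_1_2: trial division over range(3, number+1)
def pvDivsA (number : Int) : List Int :=
  (PySem.List.pyRange 3 (number + 1)).foldl
    (fun divisors i => if PySem.Int.mod number i = 0 then divisors ++ [i] else divisors) []

def find_divisors_and_frequencies (numbers : List Int) : List Int × List Int :=
  -- common_divisor = gcd(*numbers)  (computed and unused, as in A)
  let _common_divisor : Int := numbers.foldl (fun g n => (Int.gcd g n : Int)) 0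
  -- Counter() updated with each number's divisor list
  let daf : PySem.Dict Int Int :=
    numbers.foldl (fun d number => (pvDivsA number).foldl (fun d x => d.modify x 0 (· + 1)) d)
      PySem.Dict.empty
  -- del daf[1]; del daf[2]
  let daf2 := (daf.erase 1).erase 2
  -- [(t, h) for t, h in items if h != 1], then split into the two lists
  let pairs := daf2.items.filter (fun p => decide (p.2 ≠ 1))
  let divisors_list := pairs.map (·.1)
  let frequencies_list := pairs.map (·.2)
  -- sorted(zip(frequencies_list, divisors_list)) — Python tuples compare lexicographically
  let sorted_lists := PySem.List.sorted2 (frequencies_list.zip divisors_list) (·.1) (·.2)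
  (sorted_lists.map (·.2), sorted_lists.map (·.1))

-- exact integer square root (= math.isqrt on n ≥ 0), kernel-computable structural recursion
def pvIsqrtFuel : Nat → Nat → Nat
  | 0, _ => 0
  | fuel + 1, n =>
    if n < 2 then n
    else
      if (2 * pvIsqrtFuel fuel (n / 4) + 1) * (2 * pvIsqrtFuel fuel (n / 4) + 1) ≤ n then
        2 * pvIsqrtFuel fuel (n / 4) + 1
      else 2 * pvIsqrtFuel fuel (n / 4)

def pvIsqrt (n : Nat) : Nat := pvIsqrtFuel n n

-- ===== PORT B =====
-- _divisors_ge3: all divisors ≥ 3 of n (n ≥ 3) via square-root factor pairs.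
-- math.isqrt(n) is ported as pvIsqrt n.toNat, exact for n ≥ 0 (only called with n ≥ 3).
def pvDivsB (n : Int) : List Int :=
  (PySem.List.pyRange 1 (((pvIsqrt n.toNat : Nat) : Int) + 1)).foldl
    (fun divs i =>
      if PySem.Int.mod n i = 0 then
        let divs := if 3 ≤ i then divs ++ [i] else divs
        let j := PySem.Int.floordiv n i
        if j ≠ i ∧ 3 ≤ j then divs ++ [j] else divs
      else divs) []

def find_divisors_and_frequencies_alt (numbers : List Int) : List Int × List Int :=
  let counts : PySem.Dict Int Int :=
    numbers.foldl
      (fun d n =>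
        if 3 ≤ n then
          (pvDivsB n).foldl (fun d x => d.insert x (d.getD x 0 + 1)) d
        else d)
      PySem.Dict.empty
  -- items = sorted((c, d) for d, c in counts.items() if c != 1)
  let items := PySem.List.sorted2
    ((counts.items.filter (fun p => decide (p.2 ≠ 1))).map (fun p => (p.2, p.1))) (·.1) (·.2)
  -- frequencies, divisors = zip(*items); return divisors, frequencies
  -- (exact for nonempty items; on empty items Python raises ValueError — outside Pre_)
  (items.map (·.2), items.map (·.1))

-- ===== PRECONDITION & SPEC =====
-- Pre_ excludes exactly the inputs on which A raises ValueError at 'zip(*[...])': those where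
-- no divisor ≥ 3 is shared by two positions, i.e. no pair of entries ≥ 3 has gcd ≥ 3.
def Pre_find_divisors_and_frequencies (numbers : List Int) : Prop :=
  ∃ i ∈ List.range numbers.length, ∃ j ∈ List.range numbers.length,
    i < j ∧ 3 ≤ numbers.getD i 0 ∧ 3 ≤ numbers.getD j 0 ∧
      3 ≤ (Int.gcd (numbers.getD i 0) (numbers.getD j 0) : Int)
instance (numbers : List Int) : Decidable (Pre_find_divisors_and_frequencies numbers) := by
  unfold Pre_find_divisors_and_frequencies; infer_instance

def pvWitness_find_divisors_and_frequencies : List Int := [6, 9]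

def Spec_find_divisors_and_frequencies (numbers : List Int) (out : List Int × List Int) : Prop := out = find_divisors_and_frequencies_alt numbers
instance (numbers : List Int) (out : List Int × List Int) : Decidable (Spec_find_divisors_and_frequencies numbers out) := by unfold Spec_find_divisors_and_frequencies; infer_instance

-- ===== CLAIM (what is proved, stated in full; the proofs are below) =====
def Claim_equal_find_divisors_and_frequencies : Prop := ∀ (numbers : List Int), Dom_find_divisors_and_frequencies numbers → Pre_find_divisors_and_frequencies numbers → Spec_find_divisors_and_frequencies numbers (find_divisors_and_frequencies numbers)

-- ===== LEMMAS AND PROOFS =====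

-- all divisors collected on either side, as one flat multiset per side
def pvAllA (numbers : List Int) : List Int := numbers.flatMap pvDivsA
def pvAllB (numbers : List Int) : List Int :=
  (numbers.filter (fun n => decide (3 ≤ n))).flatMap pvDivsB

-- the shared post-processing of a counted multiset of divisors
def pvPost (xs : List Int) : List Int × List Int :=
  let L := ((PySem.Dict.counter xs).items.filter (fun p => decide (p.2 ≠ 1))).map
      (fun p => (p.2, p.1))
  let S := PySem.List.sorted2 L (·.1) (·.2)
  (S.map (·.2), S.map (·.1))

lemma divsA_eq (n : Int) :
    pvDivsA n = (PySem.List.pyRange 3 (n + 1)).filter (fun i => decide (PySem.Int.mod n i = 0)) := by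
  unfold pvDivsA
  simpa using PySem.List.foldl_append_ite_eq_filter (p := fun i => PySem.Int.mod n i = 0)
    (l := PySem.List.pyRange 3 (n + 1)) (acc := [])

lemma mem_divsA (n k : Int) : k ∈ pvDivsA n ↔ 3 ≤ k ∧ k ≤ n ∧ k ∣ n := by
  rw [divsA_eq]
  simp [List.mem_filter, PySem.List.mem_pyRange_one, PySem.Int.mod_eq_zero_iff_dvd]
  constructor
  · rintro ⟨⟨h1, h2⟩, h3⟩; exact ⟨h1, by omega, h3⟩
  · rintro ⟨h1, h2, h3⟩; exact ⟨⟨h1, by omega⟩, h3⟩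

lemma nodup_pyRange_one (a b : Int) : (PySem.List.pyRange a b).Nodup := by
  simp only [PySem.List.pyRange]
  split
  · exact List.nodup_nil
  · exact List.Nodup.map (fun x y h => by omega) (List.nodup_range)

lemma pairwise_lt_pyRange_one (a b : Int) :
    (PySem.List.pyRange a b).Pairwise (· < ·) := by
  simp only [PySem.List.pyRange]
  split
  · exact List.Pairwise.nil
  · exact (List.pairwise_lt_range).map _ (fun h => by omega)

lemma nodup_divsA (n : Int) : (pvDivsA n).Nodup := by
  rw [divsA_eq]; exact (nodup_pyRange_one _ _).filter _

lemma divsA_nil (n : Int) (h : n < 3) : pvDivsA n = [] := by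
  rw [divsA_eq]
  have : PySem.List.pyRange 3 (n + 1) = [] := by
    simp only [PySem.List.pyRange]
    norm_num
    intro h'; omega
  simp [this]

-- the per-iteration contribution of B's square-root loop
def pvGB (n i : Int) : List Int :=
  if PySem.Int.mod n i = 0 then
    (if 3 ≤ i then [i] else []) ++
      (if PySem.Int.floordiv n i ≠ i ∧ 3 ≤ PySem.Int.floordiv n i then [PySem.Int.floordiv n i] else [])
  else []

lemma divsB_eq (n : Int) :
    pvDivsB n = (PySem.List.pyRange 1 (((pvIsqrt n.toNat : Nat) : Int) + 1)).flatMap (pvGB n) := by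
  unfold pvDivsB
  have hbody : (fun (divs : List Int) (i : Int) =>
      if PySem.Int.mod n i = 0 then
        let divs := if 3 ≤ i then divs ++ [i] else divs
        let j := PySem.Int.floordiv n i
        if j ≠ i ∧ 3 ≤ j then divs ++ [j] else divs
      else divs) = fun divs i => divs ++ pvGB n i := by
    funext divs i
    simp only [pvGB]
    split_ifs <;> simp
  rw [hbody]
  simpa using PySem.List.foldl_append_eq_flatMap (g := pvGB n)
    (l := PySem.List.pyRange 1 (((pvIsqrt n.toNat : Nat) : Int) + 1)) (acc := [])

lemma mem_gB (n i x : Int) :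
    x ∈ pvGB n i ↔ i ∣ n ∧ 3 ≤ x ∧
      (x = i ∨ (x = PySem.Int.floordiv n i ∧ x ≠ i)) := by
  unfold pvGB
  by_cases hd : i ∣ n
  · rw [if_pos (by rw [PySem.Int.mod_eq_zero_iff_dvd]; exact hd)]
    simp only [List.mem_append]
    constructor
    · intro hmem
      rcases hmem with hmem | hmem
      · by_cases h : 3 ≤ i
        · rw [if_pos h] at hmem; simp at hmem; subst hmem; exact ⟨hd, h, Or.inl rfl⟩
        · rw [if_neg h] at hmem; simp at hmem
      · by_cases h : PySem.Int.floordiv n i ≠ i ∧ 3 ≤ PySem.Int.floordiv n i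
        · rw [if_pos h] at hmem; simp at hmem; subst hmem; exact ⟨hd, h.2, Or.inr ⟨rfl, h.1⟩⟩
        · rw [if_neg h] at hmem; simp at hmem
    · rintro ⟨-, h3, hc⟩
      rcases hc with rfl | ⟨rfl, hne⟩
      · left; rw [if_pos h3]; simp
      · right; rw [if_pos ⟨hne, h3⟩]; simp
  · rw [if_neg (by rw [PySem.Int.mod_eq_zero_iff_dvd]; exact hd)]
    simp [hd]

lemma pvIsqrtFuel_bounds : ∀ fuel n, n ≤ fuel →
    pvIsqrtFuel fuel n * pvIsqrtFuel fuel n ≤ n ∧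
      n < (pvIsqrtFuel fuel n + 1) * (pvIsqrtFuel fuel n + 1) := by
  intro fuel
  induction fuel with
  | zero =>
    intro n h
    have : n = 0 := by omega
    subst this
    simp [pvIsqrtFuel]
  | succ f ih =>
    intro n hn
    simp only [pvIsqrtFuel]
    by_cases h2 : n < 2
    · rw [if_pos h2]
      interval_cases n <;> simp
    · rw [if_neg h2]
      obtain ⟨h1, h2'⟩ := ih (n / 4) (by omega)
      set r0 := pvIsqrtFuel f (n / 4) with hr0
      by_cases hc : (2 * r0 + 1) * (2 * r0 + 1) ≤ n
      · rw [if_pos hc]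
        refine ⟨hc, ?_⟩
        have hd : n < 4 * (n / 4) + 4 := by omega
        nlinarith [h2']
      · rw [if_neg hc]
        constructor
        · have hd : 4 * (n / 4) ≤ n := by omega
          nlinarith [h1]
        · exact Nat.lt_of_not_le hc

lemma pvIsqrt_bounds (n : Nat) :
    pvIsqrt n * pvIsqrt n ≤ n ∧ n < (pvIsqrt n + 1) * (pvIsqrt n + 1) :=
  pvIsqrtFuel_bounds n n (Nat.le_refl n)

lemma sqrt_facts (n : Int) (hn : 3 ≤ n) :
    let s : Int := ((pvIsqrt n.toNat : Nat) : Int)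
    1 ≤ s ∧ s * s ≤ n ∧ n < (s + 1) * (s + 1) := by
  intro s
  rw [show s = ((pvIsqrt n.toNat : Nat) : Int) from rfl]
  obtain ⟨h1, h2⟩ := pvIsqrt_bounds n.toNat
  have h0 : ((n.toNat : Int)) = n := by omega
  have hss : ((pvIsqrt n.toNat : Nat) : Int) * ((pvIsqrt n.toNat : Nat) : Int) ≤ n := by
    rw [← h0]; exact_mod_cast h1
  have hlt : n < (((pvIsqrt n.toNat : Nat) : Int) + 1) * (((pvIsqrt n.toNat : Nat) : Int) + 1) := by
    rw [← h0]; exact_mod_cast h2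
  refine ⟨?_, hss, hlt⟩
  have hs0 : (0 : Int) ≤ ((pvIsqrt n.toNat : Nat) : Int) := Int.natCast_nonneg _
  by_contra h
  have : ((pvIsqrt n.toNat : Nat) : Int) = 0 := by omega
  rw [this] at hlt; omega

-- each cofactor n/i (i ∣ n, 1 ≤ i ≤ √n) lies at or above √n
lemma cofactor_ge (n i : Int) (hn : 3 ≤ n) (hi1 : 1 ≤ i)
    (his : i ≤ ((pvIsqrt n.toNat : Nat) : Int)) (hdvd : i ∣ n) :
    ((pvIsqrt n.toNat : Nat) : Int) ≤ n / i := by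
  obtain ⟨hs1, hss, -⟩ := sqrt_facts n hn
  set s : Int := ((pvIsqrt n.toNat : Nat) : Int)
  have hmul : i * (n / i) = n := Int.mul_ediv_cancel' hdvd
  by_contra h
  rw [not_le] at h
  have h2 : n / i ≤ s - 1 := by omega
  have : n ≤ i * (s - 1) := by
    calc n = i * (n / i) := hmul.symm
    _ ≤ i * (s - 1) := by
        apply mul_le_mul_of_nonneg_left h2 (by omega)
  nlinarith

lemma mem_divsB (n k : Int) (hn : 3 ≤ n) : k ∈ pvDivsB n ↔ 3 ≤ k ∧ k ∣ n := by
  obtain ⟨hs1, hss, hlt⟩ := sqrt_facts n hn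
  rw [divsB_eq]
  set s : Int := ((pvIsqrt n.toNat : Nat) : Int) with hs
  simp only [List.mem_flatMap, PySem.List.mem_pyRange_one]
  constructor
  · rintro ⟨i, ⟨hi1, hi2⟩, hmem⟩
    rw [mem_gB] at hmem
    obtain ⟨hdvd, h3, hcase⟩ := hmem
    refine ⟨h3, ?_⟩
    rcases hcase with rfl | ⟨rfl, -⟩
    · exact hdvd
    · rw [PySem.Int.floordiv_eq_ediv_of_pos (by omega)]
      exact ⟨i, (Int.ediv_mul_cancel hdvd).symm⟩
  · rintro ⟨h3, hdvd⟩
    have hkn : k ≤ n := Int.le_of_dvd (by omega) hdvd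
    by_cases hks : k ≤ s
    · exact ⟨k, ⟨by omega, by omega⟩, by rw [mem_gB]; exact ⟨hdvd, h3, Or.inl rfl⟩⟩
    · rw [not_le] at hks
      refine ⟨n / k, ⟨?_, ?_⟩, ?_⟩
      · rw [Int.le_ediv_iff_mul_le (by omega)]; omega
      · -- n / k < s + 1, else n ≥ (s+1)^2
        by_contra h
        rw [not_lt] at h
        have hmul : k * (n / k) = n := Int.mul_ediv_cancel' hdvd
        have : (s + 1) * (s + 1) ≤ n := by nlinarith
        omega
      · rw [mem_gB]
        have hq : (n / k) ∣ n := ⟨k, by rw [mul_comm]; exact (Int.mul_ediv_cancel' hdvd).symm⟩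
        have hq1 : 1 ≤ n / k := by rw [Int.le_ediv_iff_mul_le (by omega)]; omega
        have hfd : PySem.Int.floordiv n (n / k) = k := by
          rw [PySem.Int.floordiv_eq_ediv_of_pos (by omega)]
          have hmul : k * (n / k) = n := Int.mul_ediv_cancel' hdvd
          calc n / (n / k) = ((n / k) * k) / (n / k) := by rw [mul_comm, hmul]
          _ = k := Int.mul_ediv_cancel_left _ (by omega)
        have hqle : n / k ≤ s := by
          by_contra h
          rw [not_le] at h
          have hmul : k * (n / k) = n := Int.mul_ediv_cancel' hdvd
          have : (s + 1) * (s + 1) ≤ n := by nlinarith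
          omega
        exact ⟨hq, by omega, Or.inr ⟨hfd.symm, by omega⟩⟩
    
lemma nodup_divsB (n : Int) (hn : 3 ≤ n) : (pvDivsB n).Nodup := by
  obtain ⟨hs1, hss, hlt⟩ := sqrt_facts n hn
  rw [divsB_eq]
  set s : Int := ((pvIsqrt n.toNat : Nat) : Int) with hs
  rw [List.nodup_flatMap]
  constructor
  · intro i _
    unfold pvGB
    split_ifs with h1 h2 h3 <;> simp
    omega
  · have hpw := pairwise_lt_pyRange_one 1 (s + 1)
    have hmem : ∀ x ∈ PySem.List.pyRange 1 (s + 1), 1 ≤ x ∧ x ≤ s := by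
      intro x hx
      rw [PySem.List.mem_pyRange_one] at hx
      omega
    refine List.Pairwise.imp_of_mem ?_ hpw
    intro i i' hi hi' hlt'
    obtain ⟨hi1, his⟩ := hmem i hi
    obtain ⟨hi'1, hi's⟩ := hmem i' hi'
    intro x hx hx'
    rw [mem_gB] at hx hx'
    obtain ⟨hdvd, h3, hc⟩ := hx
    obtain ⟨hdvd', h3', hc'⟩ := hx'
    have hfd : PySem.Int.floordiv n i = n / i := PySem.Int.floordiv_eq_ediv_of_pos (by omega)
    have hfd' : PySem.Int.floordiv n i' = n / i' := PySem.Int.floordiv_eq_ediv_of_pos (by omega)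
    have hge : s ≤ n / i := cofactor_ge n i hn hi1 his hdvd
    have hge' : s ≤ n / i' := cofactor_ge n i' hn hi'1 hi's hdvd'
    have hmul : i * (n / i) = n := Int.mul_ediv_cancel' hdvd
    have hmul' : i' * (n / i') = n := Int.mul_ediv_cancel' hdvd'
    rw [hfd] at hc
    rw [hfd'] at hc'
    rcases hc with rfl | ⟨rfl, hne⟩ <;> rcases hc' with h' | ⟨h', hne'⟩
    · omega
    · -- x = i and x = n / i' ≥ s, but x = i < i' ≤ s
      omega
    · -- x = n / i ≥ s and x = i' ≤ s → x = s = i', n = i * s, s*s ≤ i*s → s ≤ i < i' = s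
      have hxs : n / i = s := by omega
      rw [hxs] at hmul
      nlinarith
    · -- n / i = n / i' with i ≠ i'
      rw [← h'] at hmul'
      have : i = i' := by
        have hpos : 0 < n / i := by omega
        nlinarith
      omega

lemma divsA_perm_divsB (n : Int) (hn : 3 ≤ n) : (pvDivsA n).Perm (pvDivsB n) := by
  rw [List.perm_ext_iff_of_nodup (nodup_divsA n) (nodup_divsB n hn)]
  intro k
  rw [mem_divsA, mem_divsB n k hn]
  constructor
  · rintro ⟨h1, -, h3⟩; exact ⟨h1, h3⟩
  · rintro ⟨h1, h2⟩
    exact ⟨h1, Int.le_of_dvd (by omega) h2, h2⟩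

lemma count_allA_eq_allB (numbers : List Int) (k : Int) :
    (pvAllA numbers).count k = (pvAllB numbers).count k := by
  induction numbers with
  | nil => rfl
  | cons n t ih =>
    unfold pvAllA pvAllB at *
    by_cases h : 3 ≤ n
    · rw [List.flatMap_cons,
        List.filter_cons_of_pos (by simpa using h), List.flatMap_cons,
        List.count_append, List.count_append, (divsA_perm_divsB n h).count_eq, ih]
    · have hnil : pvDivsA n = [] := divsA_nil n (by omega)
      rw [List.flatMap_cons, List.filter_cons_of_neg (by simpa using h), hnil, List.count_append]
      simpa using ih

-- Python's sorted on (Int, Int) tuples is the lexicographic sort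
lemma sorted2_eq_sorted_lex (xs : List (Int × Int)) :
    PySem.List.sorted2 xs (·.1) (·.2) =
      PySem.List.sorted xs (fun p => (toLex p : Lex (Int × Int))) := by
  rw [PySem.List.sorted_eq_foldl_insertBy]
  simp only [PySem.List.sorted2]
  congr 1
  funext acc x
  congr 1
  funext a b
  have : (toLex a : Lex (Int × Int)) < toLex b ↔ a.1 < b.1 ∨ a.1 = b.1 ∧ a.2 < b.2 := by
    rw [Prod.Lex.lt_iff]; simp
  by_cases h1 : a.1 < b.1 <;> by_cases h2 : b.1 < a.1 <;> by_cases h3 : a.2 < b.2 <;>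
    simp [h1, h2, h3, this] <;> omega

lemma post_congr (xs ys : List Int) (h : ∀ k, xs.count k = ys.count k) :
    pvPost xs = pvPost ys := by
  have hmem : ∀ k, k ∈ xs ↔ k ∈ ys := by
    intro k
    rw [← List.count_pos_iff, ← List.count_pos_iff, h]
  have hKperm : (PySem.Set.ofList xs).Perm (PySem.Set.ofList ys) := by
    rw [List.perm_ext_iff_of_nodup (PySem.Set.nodup_ofList xs) (PySem.Set.nodup_ofList ys)]
    intro a
    rw [PySem.Set.mem_ofList, PySem.Set.mem_ofList]
    exact hmem a
  simp only [pvPost]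
  have hitems : ∀ zs : List Int, ((PySem.Dict.counter zs).items.filter (fun p => decide (p.2 ≠ 1))).map
      (fun p => (p.2, p.1)) =
      ((PySem.Set.ofList zs).filter (fun k => decide ((zs.count k : Int) ≠ 1))).map
        (fun k => ((zs.count k : Int), k)) := by
    intro zs
    rw [PySem.Dict.items_counter, List.filter_map, List.map_map]
    rfl
  rw [hitems, hitems]
  have hfun1 : (fun k : Int => decide ((xs.count k : Int) ≠ 1)) =
      (fun k : Int => decide ((ys.count k : Int) ≠ 1)) := by
    funext k; rw [h]
  have hfun2 : (fun k : Int => ((xs.count k : Int), k)) =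
      (fun k : Int => ((ys.count k : Int), k)) := by
    funext k; rw [h]
  rw [hfun1, hfun2]
  set L₁ := ((PySem.Set.ofList xs).filter (fun k => decide ((ys.count k : Int) ≠ 1))).map
    (fun k => ((ys.count k : Int), k)) with hL₁
  set L₂ := ((PySem.Set.ofList ys).filter (fun k => decide ((ys.count k : Int) ≠ 1))).map
    (fun k => ((ys.count k : Int), k)) with hL₂
  have hLperm : L₁.Perm L₂ := (hKperm.filter _).map _
  have hsort : PySem.List.sorted2 L₁ (·.1) (·.2) = PySem.List.sorted2 L₂ (·.1) (·.2) := by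
    rw [sorted2_eq_sorted_lex, sorted2_eq_sorted_lex]
    apply PySem.List.eq_of_perm_of_pairwise_le_of_injective
      (key := fun p : Int × Int => (toLex p : Lex (Int × Int)))
    · intro a b hab
      exact toLex.injective hab
    · exact ((PySem.List.sorted_perm _ _ _).trans hLperm).trans
        (PySem.List.sorted_perm _ _ _).symm
    · exact PySem.List.sorted_pairwise _ _
    · exact PySem.List.sorted_pairwise _ _
  rw [hsort]

lemma erase_eq_self (d : PySem.Dict Int Int) (k : Int)
    (h : ∀ p ∈ d.items, p.1 ≠ k) : d.erase k = d := by
  apply PySem.Dict.ext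
  show d.items.filter (fun p => !(p.1 == k)) = d.items
  apply List.filter_eq_self.mpr
  intro p hp
  simpa using h p hp

lemma keys_counter_ge3 (numbers : List Int) (p : Int × Int)
    (hp : p ∈ (PySem.Dict.counter (pvAllA numbers)).items) : 3 ≤ p.1 := by
  rw [PySem.Dict.items_counter] at hp
  obtain ⟨k, hk, rfl⟩ := List.mem_map.mp hp
  rw [PySem.Set.mem_ofList] at hk
  obtain ⟨n, -, hn⟩ := List.mem_flatMap.mp hk
  exact ((mem_divsA n k).mp hn).1

lemma portA_eq_post (numbers : List Int) :
    find_divisors_and_frequencies numbers = pvPost (pvAllA numbers) := by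
  simp only [find_divisors_and_frequencies]
  rw [← List.foldl_flatMap, ← PySem.Dict.counter_eq_foldl]
  have h1 : PySem.Dict.counter (numbers.flatMap pvDivsA) = PySem.Dict.counter (pvAllA numbers) := rfl
  rw [h1]
  have h2 : ((PySem.Dict.counter (pvAllA numbers)).erase 1).erase 2 =
      PySem.Dict.counter (pvAllA numbers) := by
    rw [erase_eq_self _ 1 (fun p hp => by have := keys_counter_ge3 numbers p hp; omega),
        erase_eq_self _ 2 (fun p hp => by have := keys_counter_ge3 numbers p hp; omega)]
  rw [h2]
  simp only [pvPost]
  rw [List.zip_map']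

lemma portB_eq_post (numbers : List Int) :
    find_divisors_and_frequencies_alt numbers = pvPost (pvAllB numbers) := by
  simp only [find_divisors_and_frequencies_alt]
  have hflt := PySem.List.foldl_ite_eq_foldl_filter (p := fun n : Int => 3 ≤ n)
    (f := fun (d : PySem.Dict Int Int) (n : Int) =>
      (pvDivsB n).foldl (fun d x => d.insert x (d.getD x 0 + 1)) d) numbers PySem.Dict.empty
  rw [hflt, ← List.foldl_flatMap]
  rw [show ((numbers.filter (fun n => decide (3 ≤ n))).flatMap pvDivsB) = pvAllB numbers from rfl]
  rw [PySem.Dict.foldl_insert_getD_add_one_eq_counter]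
  rfl

-- ===== VERDICT (by name: the statement is the Claim_ definition above) =====
theorem find_divisors_and_frequencies_spec : Claim_equal_find_divisors_and_frequencies := by
  intro numbers _ _
  unfold Spec_find_divisors_and_frequencies
  rw [portA_eq_post, portB_eq_post]
  exact post_congr _ _ (count_allA_eq_allB numbers)
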